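-- pv_equiv track=rewrite | github.com/HermitCrabDan/CodeWarsSolutions | PythonSolutions/ConwaysGameOfLifeUnlimited.py | crop_area
-- ===== SOURCE A (Python) =====
-- def crop_area(matrix):
--     crop = True
--     while crop == True and len(matrix) > 0:
--         t = sum(matrix[0])
--         b = sum(matrix[len(matrix)-1])
--         le = ri = 0
--         for m in matrix:
--             if len(m) > 0:
--                 le += m[0]
--                 ri += m[len(m)-1]
--         if t and b and le and ri:
--             crop = False
--         else:
--             for n in range(len(matrix)):
--                 if le == 0 and len(matrix[n]) > 0:
--                     matrix[n].pop(0)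
--                 if ri == 0 and len(matrix[n]) > 0:
--                     matrix[n].pop()
--             if t == 0 and len(matrix) > 0:
--                 matrix.pop(0)
--             elif b == 0 and len(matrix) > 0:
--                 matrix.pop()
--     return matrix
-- ===== SOURCE B (Python) =====
-- def crop_area(matrix):
--     # Journal-based cropping: never mutates the board; keeps the original rows,
--     # a shrinking row window and a journal of column pops, and materializes the
--     # cropped matrix once at the end.
--     window = list(matrix)
--     pops = []  # True = a left-column pop, False = a right-column pop
--
--     def view(r):
--         v = r
--         for p in pops:
--             if not v:
--                 break
--             v = v[1:] if p else v[:-1]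
--         return v
--
--     while window:
--         t = sum(view(window[0]))
--         b = sum(view(window[-1]))
--         le = ri = 0
--         for r in window:
--             v = view(r)
--             if v:
--                 le += v[0]
--                 ri += v[-1]
--         if t and b and le and ri:
--             break
--         if le == 0:
--             pops.append(True)
--         if ri == 0:
--             pops.append(False)
--         if t == 0:
--             window = window[1:]
--         elif b == 0:
--             window = window[:-1]
--     return [view(r) for r in window]
-- ===== Notes on version B (the rewrite author's own statement) =====
-- stated objective: alternative
-- what changed: B never mutates the board: instead of popping rows and row elements in place, it keeps the original rows untouched, maintains a shrinking row window plus a journal of column pops (left/right booleans), and materializes each cropped row once at the end by replaying the journal; A's in-place mutation of its argument is not reproduced (return values are equal).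
import Mathlib
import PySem

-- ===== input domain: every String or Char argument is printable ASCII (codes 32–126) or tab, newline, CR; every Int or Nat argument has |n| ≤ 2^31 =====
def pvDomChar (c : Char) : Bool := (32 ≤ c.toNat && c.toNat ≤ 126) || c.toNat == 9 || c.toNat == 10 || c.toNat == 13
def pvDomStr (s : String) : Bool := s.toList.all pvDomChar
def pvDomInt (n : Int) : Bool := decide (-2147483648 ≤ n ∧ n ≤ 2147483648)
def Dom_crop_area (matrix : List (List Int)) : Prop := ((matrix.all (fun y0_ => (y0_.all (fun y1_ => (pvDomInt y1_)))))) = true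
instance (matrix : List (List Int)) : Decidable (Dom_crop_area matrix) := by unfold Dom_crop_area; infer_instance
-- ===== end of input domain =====

-- B re-implements A without mutating the board: it keeps the original rows, a shrinking
-- row window and a journal of column pops, and materializes the crop once at the end
-- (objective: alternative decomposition; A mutates its argument in place, B does not —
-- the equivalence proved here is about the return value).

-- ===== PORT A =====
-- One iteration of A's while loop, driven by fuel; fuel := rows + total elements + 1
-- is enough because every non-final iteration removes a row or an element.
def aLoop (fuel : Nat) (m : List (List Int)) : List (List Int) :=
  match fuel with
  | 0 => m
  | fuel + 1 =>
    if m.length > 0 then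
      let t : Int := (m.headD []).sum
      let b : Int := (m.getLastD []).sum
      let lr : Int × Int := m.foldl (fun (p : Int × Int) r =>
            if r.length > 0 then (p.1 + r.headD 0, p.2 + r.getLastD 0) else p) (0, 0)
      if t ≠ 0 ∧ b ≠ 0 ∧ lr.1 ≠ 0 ∧ lr.2 ≠ 0 then m
      else
        let m1 := m.map (fun (r : List Int) =>
            let r1 : List Int := if lr.1 = 0 ∧ r.length > 0 then r.tail else r
            if lr.2 = 0 ∧ r1.length > 0 then r1.dropLast else r1)
        let m2 := if t = 0 ∧ m1.length > 0 then m1.tail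
                  else if b = 0 ∧ m1.length > 0 then m1.dropLast else m1
        aLoop fuel m2
    else m

def crop_area (matrix : List (List Int)) : List (List Int) :=
  aLoop (matrix.length + (matrix.map List.length).sum + 1) matrix

-- ===== PORT B =====
-- view(r): replay the pop journal on row r (True = drop left, False = drop right),
-- stopping as soon as the row is exhausted.
def bView (pops : List Bool) (r : List Int) : List Int :=
  match pops with
  | [] => r
  | p :: ps => if r = [] then r else bView ps (if p then r.tail else r.dropLast)

def bLoop (fuel : Nat) (window : List (List Int)) (pops : List Bool) : List (List Int) :=
  match fuel with
  | 0 => window.map (bView pops)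
  | fuel + 1 =>
    if window.length > 0 then
      let t : Int := (bView pops (window.headD [])).sum
      let b : Int := (bView pops (window.getLastD [])).sum
      let lr : Int × Int := window.foldl (fun (p : Int × Int) r =>
            let v := bView pops r
            if v.length > 0 then (p.1 + v.headD 0, p.2 + v.getLastD 0) else p) (0, 0)
      if t ≠ 0 ∧ b ≠ 0 ∧ lr.1 ≠ 0 ∧ lr.2 ≠ 0 then window.map (bView pops)
      else
        let pops1 := if lr.1 = 0 then pops ++ [true] else pops
        let pops2 := if lr.2 = 0 then pops1 ++ [false] else pops1
        let window1 := if t = 0 then window.tail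
                       else if b = 0 then window.dropLast else window
        bLoop fuel window1 pops2
    else window.map (bView pops)

def crop_area_alt (matrix : List (List Int)) : List (List Int) :=
  bLoop (matrix.length + (matrix.map List.length).sum + 1) matrix []

-- ===== PRECONDITION & SPEC =====
def Spec_crop_area (matrix : List (List Int)) (out : List (List Int)) : Prop := out = crop_area_alt matrix
instance (matrix : List (List Int)) (out : List (List Int)) : Decidable (Spec_crop_area matrix out) := by unfold Spec_crop_area; infer_instance

-- ===== CLAIM (what is proved, stated in full; the proofs are below) =====
def Claim_equal_crop_area : Prop := ∀ (matrix : List (List Int)), Dom_crop_area matrix → Spec_crop_area matrix (crop_area matrix)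

-- ===== LEMMAS AND PROOFS =====

theorem bView_nil (pops : List Bool) : bView pops [] = [] := by
  cases pops <;> simp [bView]

theorem bView_empty : bView [] = (fun r : List Int => r) := rfl

theorem bView_append (ps : List Bool) (p : Bool) (r : List Int) :
    bView (ps ++ [p]) r =
      (let v := bView ps r
       if v = [] then v else if p then v.tail else v.dropLast) := by
  induction ps generalizing r with
  | nil => simp [bView]
  | cons q qs ih =>
    by_cases h : r = []
    · subst h; simp [bView, bView_nil]
    · simp [bView, h, ih]

theorem bView_journal (pops : List Bool) (le ri : Int) (r : List Int) :
    (let r1 := if le = 0 ∧ (bView pops r).length > 0 then (bView pops r).tail else bView pops r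
     if ri = 0 ∧ r1.length > 0 then r1.dropLast else r1)
    = bView ((if le = 0 then pops ++ [true] else pops) ++ (if ri = 0 then [false] else [])) r := by
  by_cases h1 : le = 0 <;> by_cases h2 : ri = 0 <;>
    simp only [h1, h2, if_false, List.append_nil, bView_append, true_and,
      List.length_pos_iff, if_pos] <;>
    rcases eq_or_ne (bView pops r) [] with h | h <;>
    rcases eq_or_ne ((bView pops r).tail) [] with h' | h' <;>
    simp_all

theorem map_getLastD {α β : Type} (f : α → β) (l : List α) (d : α) :
    (l.map f).getLastD (f d) = f (l.getLastD d) := by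
  rw [List.getLastD_eq_getLast?, List.getLastD_eq_getLast?, List.getLast?_map]
  cases l.getLast? <;> rfl

theorem aLoop_eq_bLoop (fuel : Nat) (window : List (List Int)) (pops : List Bool) :
    aLoop fuel (window.map (bView pops)) = bLoop fuel window pops := by
  induction fuel generalizing window pops with
  | zero => rfl
  | succ fuel ih =>
    rw [aLoop, bLoop]
    by_cases hw : window.length > 0
    · simp only [List.length_map, hw, if_pos]
      -- heads, lasts and the endpoint fold agree under the view map
      have hhead : (window.map (bView pops)).headD [] = bView pops (window.headD []) := by
        cases window with
        | nil => simp [bView_nil]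
        | cons w ws => rfl
      have hlast : (window.map (bView pops)).getLastD [] = bView pops (window.getLastD []) := by
        have := map_getLastD (bView pops) window []
        rw [bView_nil] at this
        exact this
      have hfold :
          (window.map (bView pops)).foldl (fun (p : Int × Int) r =>
              if r.length > 0 then (p.1 + r.headD 0, p.2 + r.getLastD 0) else p) (0, 0)
          = window.foldl (fun (p : Int × Int) r =>
              let v := bView pops r
              if v.length > 0 then (p.1 + v.headD 0, p.2 + v.getLastD 0) else p) (0, 0) := by
        rw [List.foldl_map]
      rw [hhead, hlast, hfold]
      set t := (bView pops (window.headD [])).sum with ht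
      set b := (bView pops (window.getLastD [])).sum with hb
      set lr := window.foldl (fun (p : Int × Int) r =>
              let v := bView pops r
              if v.length > 0 then (p.1 + v.headD 0, p.2 + v.getLastD 0) else p) (0, 0) with hlr
      by_cases hexit : t ≠ 0 ∧ b ≠ 0 ∧ lr.1 ≠ 0 ∧ lr.2 ≠ 0
      · simp [hexit]
      · simp only [hexit, if_neg, not_false_iff]
        -- column pops: the mapped per-row transform is exactly the extended journal's view
        have hcol : ∀ r : List Int,
            (let r1 := if lr.1 = 0 ∧ (bView pops r).length > 0 then (bView pops r).tail else bView pops r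
             if lr.2 = 0 ∧ r1.length > 0 then r1.dropLast else r1)
            = bView ((if lr.1 = 0 then pops ++ [true] else pops) ++
                     (if lr.2 = 0 then [false] else [])) r :=
          fun r => bView_journal pops lr.1 lr.2 r
        have hpops2 :
            (if lr.2 = 0 then (if lr.1 = 0 then pops ++ [true] else pops) ++ [false]
             else (if lr.1 = 0 then pops ++ [true] else pops))
            = (if lr.1 = 0 then pops ++ [true] else pops) ++
              (if lr.2 = 0 then [false] else []) := by
          by_cases h2 : lr.2 = 0 <;> simp [h2]
        set pops2 := (if lr.1 = 0 then pops ++ [true] else pops) ++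
              (if lr.2 = 0 then [false] else []) with hp2
        have hm1 : (window.map (bView pops)).map (fun r =>
            let r1 := if lr.1 = 0 ∧ r.length > 0 then r.tail else r
            if lr.2 = 0 ∧ r1.length > 0 then r1.dropLast else r1)
            = window.map (bView pops2) := by
          rw [List.map_map]
          exact List.map_congr_left (fun r _ => hcol r)
        rw [hm1]
        simp only [and_true]
        rw [hpops2]
        by_cases hT : t = 0
        · simp only [hT, if_pos]
          rw [← List.map_tail]
          exact ih window.tail pops2
        · simp only [hT, if_neg, not_false_iff]
          by_cases hB : b = 0
          · simp only [hB, if_pos]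
            rw [← List.map_dropLast]
            exact ih window.dropLast pops2
          · simp only [hB, if_neg, not_false_iff]
            exact ih window pops2
    · simp [List.length_map, hw]

-- ===== VERDICT (by name: the statement is the Claim_ definition above) =====
theorem crop_area_spec : Claim_equal_crop_area := by
  intro matrix _
  show crop_area matrix = crop_area_alt matrix
  unfold crop_area crop_area_alt
  have h := aLoop_eq_bLoop (matrix.length + (matrix.map List.length).sum + 1) matrix ([] : List Bool)
  simpa only [bView_empty, List.map_id'] using h
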